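-- pv_equiv track=rewrite | github.com/Revi1337/BaekJoon-Coding-Test | 백준/Silver/2548. 대표 자연수/대표 자연수.py | solution
-- ===== SOURCE A (Python) =====
-- def solution(N, A):
--     A.sort()
--     total = sum([number - A[0] for number in A])
--     answer = A[0]
--     for idx in range(1, N):
--         height = A[idx] - A[idx - 1]
--         left = height * idx
--         right = height * (N - idx)
--         if total + left - right < total:
--             answer = A[idx]
--             total = total + left - right
--     return answer
-- ===== SOURCE B (Python) =====
-- def solution(N, A):
--     A.sort()
--     return A[max(N - 1, 0) // 2]
-- ===== Notes on version B (the rewrite author's own statement) =====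
-- stated objective: simpler
-- what changed: Replaces the incremental deviation-sum sweep (running total plus per-index improvement test) by the closed-form lower median: sort and index A[max(N-1,0)//2].
import Mathlib
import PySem

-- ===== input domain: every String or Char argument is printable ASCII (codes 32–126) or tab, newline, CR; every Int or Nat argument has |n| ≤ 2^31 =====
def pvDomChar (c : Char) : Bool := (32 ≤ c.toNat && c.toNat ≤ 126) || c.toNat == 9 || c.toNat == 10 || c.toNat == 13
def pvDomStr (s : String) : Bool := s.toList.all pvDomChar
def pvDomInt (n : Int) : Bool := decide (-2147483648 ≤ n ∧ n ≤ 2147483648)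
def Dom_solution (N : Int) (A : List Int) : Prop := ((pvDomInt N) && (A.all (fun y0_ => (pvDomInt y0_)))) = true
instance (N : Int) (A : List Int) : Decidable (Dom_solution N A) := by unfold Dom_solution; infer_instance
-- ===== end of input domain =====

-- B replaces A's incremental deviation-sum sweep by the closed-form lower median
-- (sort, then index (N-1)//2): simpler, same result on 1 ≤ N ≤ len(A).
-- Both A and B sort the list argument in place; the equivalence proved is about the return value.


-- ===== PORT A =====
def solution (N : Int) (A : List Int) : Int :=
  let As := PySem.List.sorted A (fun x => x) false
  let a0 := PySem.List.pyGetD As 0 0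
  let total := (As.map (fun number => number - a0)).sum
  let st := (PySem.List.pyRange 1 N 1).foldl (fun (st : Int × Int) idx =>
      let answer := st.1
      let total := st.2
      let height := PySem.List.pyGetD As idx 0 - PySem.List.pyGetD As (idx - 1) 0
      let left := height * idx
      let right := height * (N - idx)
      if total + left - right < total then (PySem.List.pyGetD As idx 0, total + left - right)
      else (answer, total)) (a0, total)
  st.1

-- ===== PORT B =====
def solution_alt (N : Int) (A : List Int) : Int :=
  PySem.List.pyGetD (PySem.List.sorted A (fun x => x) false) (PySem.Int.floordiv (max (N - 1) 0) 2) 0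

-- ===== PRECONDITION & SPEC =====
-- Pre_ excludes exactly the inputs where A raises IndexError: an empty list (the comprehension
-- skips A[0] but 'answer = A[0]' raises) and N > len(A) (the loop reads A[idx] past the end).
def Pre_solution (N : Int) (A : List Int) : Prop := A ≠ [] ∧ N ≤ (A.length : Int)
instance (N : Int) (A : List Int) : Decidable (Pre_solution N A) := by unfold Pre_solution; infer_instance
def pvWitness_solution : Int × List Int := (3, [5, 1, 4])
def Spec_solution (N : Int) (A : List Int) (out : Int) : Prop := out = solution_alt N A
instance (N : Int) (A : List Int) (out : Int) : Decidable (Spec_solution N A out) := by unfold Spec_solution; infer_instance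

-- ===== CLAIM (what is proved, stated in full; the proofs are below) =====
def Claim_equal_solution : Prop := ∀ (N : Int) (A : List Int), Dom_solution N A → Pre_solution N A → Spec_solution N A (solution N A)

-- ===== LEMMAS AND PROOFS =====

-- adjacent / general monotonicity of the sorted list, in pyGetD form
lemma pyGetD_mono_of_pairwise (As : List Int) (hs : As.Pairwise (· ≤ ·))
    (p q : Int) (hp : 0 ≤ p) (hpq : p ≤ q) (hq : q < (As.length : Int)) :
    PySem.List.pyGetD As p 0 ≤ PySem.List.pyGetD As q 0 := by
  rcases lt_or_eq_of_le hpq with h | h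
  · have ep : PySem.List.pyGetD As p 0 = As[p.toNat] :=
      PySem.List.pyGetD_eq_getElem As (i := p) 0 hp (by omega)
    have eq' : PySem.List.pyGetD As q 0 = As[q.toNat] :=
      PySem.List.pyGetD_eq_getElem As (i := q) 0 (by omega) hq
    rw [ep, eq']
    exact (List.pairwise_iff_getElem.mp hs) p.toNat q.toNat (by omega) (by omega) (by omega)
  · rw [h]

-- loop invariant: the answer kept by A's sweep over range(k, N) equals As[min(k-1, (N-1)//2)]
lemma sweep_inv (As : List Int) (N : Int) (hs : As.Pairwise (· ≤ ·))
    (hlen : N ≤ (As.length : Int)) :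
    ∀ (n : Nat) (k t : Int), (N - k).toNat = n → 1 ≤ k → k ≤ N →
    ((PySem.List.pyRange k N 1).foldl (fun (st : Int × Int) idx =>
        let answer := st.1
        let total := st.2
        let height := PySem.List.pyGetD As idx 0 - PySem.List.pyGetD As (idx - 1) 0
        let left := height * idx
        let right := height * (N - idx)
        if total + left - right < total then (PySem.List.pyGetD As idx 0, total + left - right)
        else (answer, total))
      (PySem.List.pyGetD As (min (k - 1) (((N - 1) / 2))) 0, t)).1
    = PySem.List.pyGetD As (min (N - 1) (((N - 1) / 2))) 0 := by
  intro n
  induction n with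
  | zero =>
    intro k t hn hk1 hkN
    have hkN' : k = N := by omega
    subst hkN'
    rw [PySem.List.pyRange_one_eq_nil (by omega)]
    simp
  | succ m ih =>
    intro k t hn hk1 hkN
    have hkN' : k < N := by omega
    rw [PySem.List.pyRange_one_cons hkN']
    simp only [List.foldl_cons]
    have hmono : PySem.List.pyGetD As (k - 1) 0 ≤ PySem.List.pyGetD As k 0 :=
      pyGetD_mono_of_pairwise As hs (k - 1) k (by omega) (by omega) (by omega)
    set h := PySem.List.pyGetD As k 0 - PySem.List.pyGetD As (k - 1) 0 with hh
    have h0 : 0 ≤ h := by omega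
    by_cases hc : t + h * k - h * (N - k) < t
    · -- condition fires: h > 0 and 2k < N, so k ≤ (N-1)//2 and the answer becomes As[k]
      have hk2 : h * k < h * (N - k) := by omega
      have hpos : 0 < h := by nlinarith
      have h2k : 2 * k < N := by nlinarith
      have : min k (((N - 1) / 2)) = k := by omega
      simp only [if_pos hc]
      have := ih (k + 1) (t + h * k - h * (N - k)) (by omega) (by omega) (by omega)
      rw [show k + 1 - 1 = k by ring] at this
      rw [← this, ‹min k (((N - 1) / 2)) = k›]
    · -- condition does not fire: either k is past the median index, or As[k] = As[k-1]
      simp only [if_neg hc]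
      have := ih (k + 1) t (by omega) (by omega) (by omega)
      rw [show k + 1 - 1 = k by ring] at this
      have hge : h * (N - k) ≤ h * k := by omega
      have hstep : PySem.List.pyGetD As (min (k - 1) ((N - 1) / 2)) 0
          = PySem.List.pyGetD As (min k ((N - 1) / 2)) 0 := by
        by_cases h2k : 2 * k < N
        · -- then h = 0: As[k] = As[k-1], and both mins select adjacent equal values
          have hz : h = 0 := by nlinarith
          rw [show min (k - 1) ((N - 1) / 2) = k - 1 by omega,
              show min k ((N - 1) / 2) = k by omega]
          omega
        · -- k > (N-1)//2: both mins are (N-1)//2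
          rw [show min (k - 1) ((N - 1) / 2) = (N - 1) / 2 by omega,
              show min k ((N - 1) / 2) = (N - 1) / 2 by omega]
      rw [hstep, ← this]

-- ===== VERDICT (by name: the statement is the Claim_ definition above) =====
theorem solution_spec : Claim_equal_solution := by
  intro N A _ hpre
  obtain ⟨hne, hNlen⟩ := hpre
  unfold Spec_solution solution solution_alt
  set As := PySem.List.sorted A (fun x => x) false with hAs
  have hlen' : As.length = A.length := by
    rw [hAs]; exact PySem.List.length_sorted A (fun x => x) false
  have hlenAs : (As.length : Int) = (A.length : Int) := by exact_mod_cast hlen'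
  have hs : As.Pairwise (· ≤ ·) := PySem.List.sorted_pairwise A (fun x => x)
  by_cases hN : N ≤ 1
  · -- range(1, N) is empty: A returns As[0]; and max(N-1,0)//2 = 0
    rw [PySem.List.pyRange_one_eq_nil (by omega)]
    simp only [List.foldl_nil]
    congr 1
    rw [show max (N - 1) 0 = 0 by omega]
    decide
  · -- N ≥ 2: the sweep lands on the lower median As[(N-1)//2]
    have hM : PySem.Int.floordiv (max (N - 1) 0) 2 = (N - 1) / 2 := by
      rw [show max (N - 1) 0 = N - 1 by omega]
      exact PySem.Int.floordiv_eq_ediv_of_pos (by omega)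
    have h0 : PySem.List.pyGetD As 0 0
        = PySem.List.pyGetD As (min (1 - 1) ((N - 1) / 2)) 0 := by
      congr 1
      omega
    simp only [h0]
    rw [sweep_inv As N hs (by omega) (N - 1).toNat 1 _ (by omega) (by omega) (by omega)]
    rw [hM]
    congr 1
    omega
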